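-- pv_equiv track=rewrite | github.com/gkrieg/mmunin | cutfinder.py | unserialize_path
-- ===== SOURCE A (Python) =====
-- def unserialize_path(serialP):
--
--     P = []
--     edge = []
--     for l in serialP:
--         if l == 'e':
--             if edge != []:
--                 P.append(''.join(edge))
--             edge = ['e']
--         else:
--             edge.append(l)
--     return P
-- ===== SOURCE B (Python) =====
-- def unserialize_path(serialP):
--     parts = serialP.split('e')
--     P = [parts[0]] if len(parts) > 1 and parts[0] != '' else []
--     P += ['e' + p for p in parts[1:-1]]
--     return P
-- ===== Notes on version B (the rewrite author's own statement) =====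
-- stated objective: simpler
-- what changed: B replaces A's char-by-char scan with mutable P/edge accumulators by one str.split on the delimiter plus a slice/comprehension over the resulting segments.
import Mathlib
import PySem

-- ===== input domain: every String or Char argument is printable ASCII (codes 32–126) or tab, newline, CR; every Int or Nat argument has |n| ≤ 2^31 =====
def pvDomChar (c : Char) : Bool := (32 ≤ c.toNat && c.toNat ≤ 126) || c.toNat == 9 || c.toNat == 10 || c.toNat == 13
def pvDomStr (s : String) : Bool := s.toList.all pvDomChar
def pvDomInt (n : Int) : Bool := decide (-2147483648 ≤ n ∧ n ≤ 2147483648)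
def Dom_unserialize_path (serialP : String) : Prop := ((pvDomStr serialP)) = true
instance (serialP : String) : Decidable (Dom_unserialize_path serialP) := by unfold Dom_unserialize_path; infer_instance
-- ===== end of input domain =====

-- B replaces A's char-by-char scan with one split('e') plus a slice over the segments (objective: simpler).

-- ===== PORT A =====
-- loop state: (P, edge); 'e' flushes the current edge (if nonempty) and restarts it as ['e']
def unserialize_path (serialP : String) : List String :=
  (serialP.toList.foldl
    (fun (st : List String × List Char) l =>
      if l = 'e' then
        (if st.2 ≠ [] then st.1 ++ [String.mk st.2] else st.1, ['e'])
      else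
        (st.1, st.2 ++ [l]))
    ([], [])).1

-- ===== PORT B =====
-- hand port of Python str.split with the one-character separator 'e' (exact: returns the
-- maximal 'e'-free segments, always at least one, possibly empty)
def pvSplitE : List Char → List (List Char)
  | [] => [[]]
  | c :: cs =>
    if c = 'e' then [] :: pvSplitE cs
    else
      match pvSplitE cs with
      | [] => [[c]]      -- unreachable: pvSplitE never returns []
      | p :: ps => (c :: p) :: ps

def unserialize_path_alt (serialP : String) : List String :=
  let parts := pvSplitE serialP.toList
  let P := if parts.length > 1 ∧ parts.headI ≠ [] then [String.mk parts.headI] else []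
  P ++ ((parts.drop 1).dropLast.map (fun p => String.mk ('e' :: p)))

-- ===== PRECONDITION & SPEC =====
def Spec_unserialize_path (serialP : String) (out : List String) : Prop := out = unserialize_path_alt serialP
instance (serialP : String) (out : List String) : Decidable (Spec_unserialize_path serialP out) := by unfold Spec_unserialize_path; infer_instance

-- ===== CLAIM (what is proved, stated in full; the proofs are below) =====
def Claim_equal_unserialize_path : Prop := ∀ (serialP : String), Dom_unserialize_path serialP → Spec_unserialize_path serialP (unserialize_path serialP)

-- ===== LEMMAS AND PROOFS =====

theorem pvSplitE_ne_nil (cs : List Char) : pvSplitE cs ≠ [] := by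
  cases cs with
  | nil => simp [pvSplitE]
  | cons c cs =>
    simp only [pvSplitE]
    split
    · simp
    · split <;> simp

-- the invariant: the fold's P-component equals the initial P ++ the split-based tail
theorem fold_eq_split (cs : List Char) : ∀ (P : List String) (edge : List Char),
    (cs.foldl
      (fun (st : List String × List Char) l =>
        if l = 'e' then
          (if st.2 ≠ [] then st.1 ++ [String.mk st.2] else st.1, ['e'])
        else
          (st.1, st.2 ++ [l]))
      (P, edge)).1
    = P ++ (match pvSplitE cs with
            | [] => []
            | [_] => []
            | p :: ps =>
              (if edge ++ p ≠ [] then [String.mk (edge ++ p)] else [])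
                ++ ps.dropLast.map (fun q => String.mk ('e' :: q))) := by
  induction cs with
  | nil => intro P edge; simp [pvSplitE]
  | cons c cs ih =>
    intro P edge
    by_cases hc : c = 'e'
    · subst hc
      simp only [List.foldl_cons, if_true]
      rw [ih]
      have hne := pvSplitE_ne_nil cs
      simp only [pvSplitE]
      cases hp : pvSplitE cs with
      | nil => exact absurd hp hne
      | cons p ps =>
        cases ps with
        | nil =>
          by_cases h : edge = [] <;> simp [h]
        | cons p' ps' =>
          simp [List.dropLast]
          split <;> simp_all
    · simp only [List.foldl_cons, if_neg hc]
      rw [ih]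
      have hne := pvSplitE_ne_nil cs
      simp only [pvSplitE, if_neg hc]
      cases hp : pvSplitE cs with
      | nil => exact absurd hp hne
      | cons p ps =>
        cases ps with
        | nil => simp
        | cons p' ps' =>
          simp [List.append_assoc]

-- ===== VERDICT (by name: the statement is the Claim_ definition above) =====
theorem unserialize_path_spec : Claim_equal_unserialize_path := by
  intro s _
  show unserialize_path s = unserialize_path_alt s
  unfold unserialize_path unserialize_path_alt
  rw [fold_eq_split]
  have hne := pvSplitE_ne_nil s.toList
  cases hp : pvSplitE s.toList with
  | nil => exact absurd hp hne
  | cons p ps =>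
    cases ps with
    | nil => simp
    | cons p' ps' => simp [List.headI]
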